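-- pv_equiv track=rewrite | github.com/Robotopera/voicemeeterSoundboardGen | multiBoardGen.py | fitToGrid
-- ===== SOURCE A (Python) =====
-- def fitToGrid(n, b):
--     digits = ""
--     if n == 0:
--         digits = "0"
--         digits = str(int(digits)+1)
--         return digits
--     while n:
--         digits = str(n % b) + digits
--         n //= b
--     digits = str(int(digits)+1)
--     return digits
-- ===== SOURCE B (Python) =====
-- def fitToGrid(n, b):
--     def rec(m):
--         return "" if m == 0 else rec(m // b) + str(m % b)
--     digits = "0" if n == 0 else rec(n)
--     return str(int(digits) + 1)
-- ===== Notes on version B (the rewrite author's own statement) =====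
-- stated objective: simpler
-- what changed: Replaces the prepend-accumulator while-loop with a recursive helper rec(m) = rec(m//b) + str(m%b) that emits digits most-significant-first on the way back up, and folds A's duplicated str(int(...)+1) return into one place.
import Mathlib
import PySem

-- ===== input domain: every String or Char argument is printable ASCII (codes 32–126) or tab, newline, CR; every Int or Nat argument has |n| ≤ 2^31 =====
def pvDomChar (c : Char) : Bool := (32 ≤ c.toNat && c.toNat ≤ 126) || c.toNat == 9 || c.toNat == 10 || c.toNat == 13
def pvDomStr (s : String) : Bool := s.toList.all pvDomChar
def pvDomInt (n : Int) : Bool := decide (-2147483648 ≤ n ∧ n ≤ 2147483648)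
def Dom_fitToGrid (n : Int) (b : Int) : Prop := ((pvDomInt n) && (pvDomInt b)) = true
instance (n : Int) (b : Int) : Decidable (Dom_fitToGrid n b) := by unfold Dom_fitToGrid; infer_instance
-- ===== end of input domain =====

-- B replaces A's prepend-accumulator while-loop with a recursive divide-by-b helper that
-- emits digits most-significant-first on the way back up (objective: simpler).


-- ===== PORT A =====
-- A's while-loop; `fuel` only makes the recursion total (Python A diverges where it runs out,
-- and those inputs are outside Pre_).
def fitLoopA (fuel : Nat) (n : Int) (b : Int) (digits : String) : String :=
  match fuel with
  | 0 => digits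
  | fuel + 1 =>
    if n = 0 then digits
    else fitLoopA fuel (PySem.Int.floordiv n b) b (PySem.Int.toStr (PySem.Int.mod n b) ++ digits)

def fitToGrid (n : Int) (b : Int) : String :=
  if n = 0 then
    let digits := "0"
    let digits := PySem.Int.toStr ((PySem.Int.ofStr? digits).getD 0 + 1)  -- int() cannot fail here
    digits
  else
    let digits := fitLoopA (n.natAbs + 1) n b ""
    -- `.getD 0` only totalises int(); inside Pre_ the digit string always parses
    PySem.Int.toStr ((PySem.Int.ofStr? digits).getD 0 + 1)

-- ===== PORT B =====
-- B's rec helper; same fuel guard for totality only.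
def fitRecB (fuel : Nat) (b : Int) (m : Int) : String :=
  match fuel with
  | 0 => ""
  | fuel + 1 =>
    if m = 0 then ""
    else fitRecB fuel b (PySem.Int.floordiv m b) ++ PySem.Int.toStr (PySem.Int.mod m b)

def fitToGrid_alt (n : Int) (b : Int) : String :=
  let digits := if n = 0 then "0" else fitRecB (n.natAbs + 1) b n
  PySem.Int.toStr ((PySem.Int.ofStr? digits).getD 0 + 1)

-- ===== PRECONDITION & SPEC =====
-- Pre_ is exactly where Python A returns: n = 0 (any b); positive n with base ≥ 2;
-- and n = -1 with b ≤ -2 (one loop iteration). Elsewhere A raises ZeroDivisionError /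
-- ValueError or loops forever.
def Pre_fitToGrid (n : Int) (b : Int) : Prop :=
  n = 0 ∨ (1 ≤ n ∧ 2 ≤ b) ∨ (n = -1 ∧ b ≤ -2)
instance (n : Int) (b : Int) : Decidable (Pre_fitToGrid n b) := by unfold Pre_fitToGrid; infer_instance
def pvWitness_fitToGrid : Int × Int := (7, 2)

def Spec_fitToGrid (n : Int) (b : Int) (out : String) : Prop := out = fitToGrid_alt n b
instance (n : Int) (b : Int) (out : String) : Decidable (Spec_fitToGrid n b out) := by unfold Spec_fitToGrid; infer_instance

-- ===== CLAIM (what is proved, stated in full; the proofs are below) =====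
def Claim_equal_fitToGrid : Prop := ∀ (n : Int) (b : Int), Dom_fitToGrid n b → Pre_fitToGrid n b → Spec_fitToGrid n b (fitToGrid n b)

-- ===== LEMMAS AND PROOFS =====

-- A's loop with accumulator equals B's recursion appended to the accumulator.
theorem fitLoopA_eq_recB (fuel : Nat) (b : Int) :
    ∀ (n : Int) (digits : String), fitLoopA fuel n b digits = fitRecB fuel b n ++ digits := by
  induction fuel with
  | zero => intro n digits; simp [fitLoopA, fitRecB]
  | succ f ih =>
    intro n digits
    by_cases h : n = 0
    · simp [fitLoopA, fitRecB, h]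
    · simp only [fitLoopA, fitRecB, if_neg h, ih]
      rw [String.append_assoc]

-- ===== VERDICT (by name: the statement is the Claim_ definition above) =====
theorem fitToGrid_spec : Claim_equal_fitToGrid := by
  intro n b _ _
  show fitToGrid n b = fitToGrid_alt n b
  by_cases h : n = 0
  · simp [fitToGrid, fitToGrid_alt, h]
  · simp [fitToGrid, fitToGrid_alt, h, fitLoopA_eq_recB]
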